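-- pv_equiv track=rewrite | github.com/c0debr34k3r/Codebreaker | eval/eval.py | assign_labels_based_on_repos
-- ===== SOURCE A (Python) =====
-- def assign_labels_based_on_repos(repo_lists):
--     labels = [0] * len(repo_lists)
--     current_label = 1
--
--     for i in range(len(repo_lists)):
--         if repo_lists[i] is None:
--             continue
--
--         if labels[i] != 0:
--             continue
--
--         labels[i] = current_label
--
--         for j in range(i + 1, len(repo_lists)):
--             if repo_lists[j] is not None and repo_lists[i] & repo_lists[j]:
--                 labels[j] = current_label
--
--         current_label += 1
--
--     return labels
-- ===== SOURCE B (Python) =====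
-- def assign_labels_based_on_repos(repo_lists):
--     labels = []
--     owner = {}  # element -> label of the latest group leader whose set contains it
--     current = 1
--     for s in repo_lists:
--         if s is None:
--             labels.append(0)
--             continue
--         best = 0
--         for e in s:
--             v = owner.get(e, 0)
--             if v > best:
--                 best = v
--         if best:
--             labels.append(best)
--         else:
--             labels.append(current)
--             for e in s:
--                 owner[e] = current
--             current += 1
--     return labels
-- ===== Notes on version B (the rewrite author's own statement) =====
-- stated objective: faster
-- what changed: Replaces A's nested rescan of all later sets per leader by a single pass that keeps an inverted index element -> label of the latest leader containing it, so each node's label is the max owner label over its elements (labels grow with leader order, so max = last overwrite).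
import Mathlib
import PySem

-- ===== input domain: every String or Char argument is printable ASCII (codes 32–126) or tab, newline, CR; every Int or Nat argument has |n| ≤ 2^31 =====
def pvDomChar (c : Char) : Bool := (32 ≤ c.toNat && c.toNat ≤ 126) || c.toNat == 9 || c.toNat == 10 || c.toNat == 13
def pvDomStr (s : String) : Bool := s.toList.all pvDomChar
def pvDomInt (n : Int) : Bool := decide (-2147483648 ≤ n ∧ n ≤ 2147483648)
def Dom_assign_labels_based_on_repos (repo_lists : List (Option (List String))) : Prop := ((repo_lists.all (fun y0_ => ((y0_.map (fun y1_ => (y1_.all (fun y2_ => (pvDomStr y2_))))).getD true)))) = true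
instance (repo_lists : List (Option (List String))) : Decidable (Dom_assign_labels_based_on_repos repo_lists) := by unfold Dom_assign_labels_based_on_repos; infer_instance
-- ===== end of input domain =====

-- B replaces A's quadratic pairwise-intersection rescan by a single pass with an
-- inverted index element -> label of the latest leader containing it (objective: faster).

-- ===== PORT A =====
-- truthiness of 'si & sj' (nonempty set intersection)
def pyIntersects (si sj : List String) : Bool := si.any (fun x => sj.contains x)

-- inner loop 'for j in range(i+1, len(repo_lists)): …'
def aInner (rl : List (Option (List String))) (si : List String) (c : Int)
    (labels : List Int) (js : List Nat) : List Int :=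
  js.foldl (fun labels j =>
    match rl.getD j none with
    | none => labels
    | some sj => if pyIntersects si sj then labels.set j c else labels) labels

-- one outer-loop iteration, state = (labels, current_label)
def aStep (rl : List (Option (List String))) (st : List Int × Int) (i : Nat) : List Int × Int :=
  match rl.getD i none with
  | none => st
  | some si =>
    if st.1.getD i 0 ≠ 0 then st
    else
      (aInner rl si st.2 (st.1.set i st.2) (List.range' (i + 1) (rl.length - (i + 1))), st.2 + 1)

def assign_labels_based_on_repos (repo_lists : List (Option (List String))) : List Int :=
  ((List.range repo_lists.length).foldl (aStep repo_lists)
    (List.replicate repo_lists.length 0, 1)).1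

-- ===== PORT B =====
-- 'best = 0; for e in s: v = owner.get(e, 0); if v > best: best = v'
def bBest (owner : PySem.Dict String Int) (es : List String) : Int :=
  es.foldl (fun b e => let v := owner.getD e 0; if v > b then v else b) 0

-- one iteration of B's single pass, state = (labels, owner, current)
def bStep (st : List Int × PySem.Dict String Int × Int) (s : Option (List String)) :
    List Int × PySem.Dict String Int × Int :=
  match s with
  | none => (st.1 ++ [0], st.2.1, st.2.2)
  | some es =>
    let best := bBest st.2.1 es
    if best ≠ 0 then (st.1 ++ [best], st.2.1, st.2.2)
    else (st.1 ++ [st.2.2], es.foldl (fun d e => d.insert e st.2.2) st.2.1, st.2.2 + 1)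

def assign_labels_based_on_repos_alt (repo_lists : List (Option (List String))) : List Int :=
  (repo_lists.foldl bStep ([], PySem.Dict.empty, 1)).1

-- ===== PRECONDITION & SPEC =====
def Spec_assign_labels_based_on_repos (repo_lists : List (Option (List String))) (out : List Int) : Prop := out = assign_labels_based_on_repos_alt repo_lists
instance (repo_lists : List (Option (List String))) (out : List Int) : Decidable (Spec_assign_labels_based_on_repos repo_lists out) := by unfold Spec_assign_labels_based_on_repos; infer_instance

-- ===== CLAIM (what is proved, stated in full; the proofs are below) =====
def Claim_equal_assign_labels_based_on_repos : Prop := ∀ (repo_lists : List (Option (List String))), Dom_assign_labels_based_on_repos repo_lists → Spec_assign_labels_based_on_repos repo_lists (assign_labels_based_on_repos repo_lists)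

-- ===== LEMMAS AND PROOFS =====

-- owner as inserted by a leader's element loop
theorem owner_insertAll_getD (c : Int) (si : List String) (d : PySem.Dict String Int) (e : String) :
    (si.foldl (fun d e => d.insert e c) d).getD e 0
      = if e ∈ si then c else d.getD e 0 := by
  induction si generalizing d with
  | nil => simp
  | cons a t ih =>
    simp only [List.foldl_cons, ih, PySem.Dict.getD_insert, List.mem_cons]
    by_cases h1 : e ∈ t <;> by_cases h2 : e = a <;> simp [h1, h2]

-- bBest with a generalized accumulator
theorem bAux_le (d : PySem.Dict String Int) (es : List String) (b c : Int)
    (hb : b ≤ c) (h : ∀ e ∈ es, d.getD e 0 ≤ c) :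
    es.foldl (fun b e => let v := d.getD e 0; if v > b then v else b) b ≤ c := by
  induction es generalizing b with
  | nil => simpa using hb
  | cons a t ih =>
    simp only [List.foldl_cons]
    apply ih
    · dsimp only; split
      · exact h a (by simp)
      · exact hb
    · intro e he; exact h e (List.mem_cons_of_mem _ he)

theorem le_bAux (d : PySem.Dict String Int) (es : List String) (b : Int) :
    b ≤ es.foldl (fun b e => let v := d.getD e 0; if v > b then v else b) b := by
  induction es generalizing b with
  | nil => simp
  | cons a t ih =>
    simp only [List.foldl_cons]
    refine le_trans ?_ (ih _)
    dsimp only; split <;> omega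

theorem mem_le_bAux (d : PySem.Dict String Int) (es : List String) (b : Int)
    (e : String) (he : e ∈ es) :
    d.getD e 0 ≤ es.foldl (fun b e => let v := d.getD e 0; if v > b then v else b) b := by
  induction es generalizing b with
  | nil => simp at he
  | cons a t ih =>
    simp only [List.foldl_cons]
    rcases List.mem_cons.mp he with h | h
    · subst h
      refine le_trans ?_ (le_bAux d t _)
      dsimp only; split <;> omega
    · exact ih _ h

theorem bAux_congr (d1 d2 : PySem.Dict String Int) (es : List String)
    (h : ∀ e ∈ es, d1.getD e 0 = d2.getD e 0) : ∀ b : Int,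
    es.foldl (fun b e => let v := d1.getD e 0; if v > b then v else b) b
      = es.foldl (fun b e => let v := d2.getD e 0; if v > b then v else b) b := by
  induction es with
  | nil => intro b; rfl
  | cons a t ih =>
    intro b
    simp only [List.foldl_cons]
    rw [h a (by simp)]
    exact ih (fun e he => h e (List.mem_cons_of_mem _ he)) _

theorem bBest_congr (d1 d2 : PySem.Dict String Int) (es : List String)
    (h : ∀ e ∈ es, d1.getD e 0 = d2.getD e 0) : bBest d1 es = bBest d2 es :=
  bAux_congr d1 d2 es h 0

theorem bBest_le (d : PySem.Dict String Int) (es : List String) (c : Int)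
    (hc : 0 ≤ c) (h : ∀ e ∈ es, d.getD e 0 ≤ c) : bBest d es ≤ c :=
  bAux_le d es 0 c hc h

theorem bBest_empty (es : List String) : bBest PySem.Dict.empty es = 0 := by
  have h1 : bBest PySem.Dict.empty es ≤ 0 :=
    bBest_le _ _ 0 le_rfl (by intro e _; simp [PySem.Dict.getD_empty])
  exact le_antisymm h1 (le_bAux PySem.Dict.empty es 0)

-- the labels array produced by A's inner loop, pointwise
theorem aInner_getD (rl : List (Option (List String))) (si : List String) (c : Int)
    (js : List Nat) (labels : List Int) (m : Nat) (hmlt : m < labels.length) :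
    (aInner rl si c labels js).getD m 0
      = if m ∈ js ∧ ∃ sj, rl.getD m none = some sj ∧ pyIntersects si sj then c
        else labels.getD m 0 := by
  induction js generalizing labels with
  | nil => simp [aInner]
  | cons j t ih =>
    have hfold : aInner rl si c labels (j :: t) = aInner rl si c
        (match rl.getD j none with
         | none => labels
         | some sj => if pyIntersects si sj then labels.set j c else labels) t := rfl
    have hlenstep : (match rl.getD j none with
         | none => labels
         | some sj => if pyIntersects si sj then labels.set j c else labels).length
        = labels.length := by
      rcases rl.getD j none with _ | sj
      · rfl
      · dsimp only; split <;> simp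
    rw [hfold, ih _ (by omega)]
    by_cases hm : m ∈ t ∧ ∃ sj, rl.getD m none = some sj ∧ pyIntersects si sj
    · rw [if_pos hm, if_pos ⟨List.mem_cons_of_mem _ hm.1, hm.2⟩]
    · rw [if_neg hm]
      rcases h : rl.getD j none with _ | sj
      · dsimp only
        rw [if_neg]
        rintro ⟨hmem, sj, hsj, hint⟩
        rcases List.mem_cons.mp hmem with rfl | hmt
        · rw [h] at hsj; cases hsj
        · exact hm ⟨hmt, sj, hsj, hint⟩
      · dsimp only
        by_cases hint : pyIntersects si sj
        · rw [if_pos hint]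
          by_cases hjm : m = j
          · subst hjm
            rw [if_pos ⟨List.mem_cons_self, sj, h, hint⟩]
            rw [List.getD_eq_getElem?_getD, List.getElem?_set_self hmlt]; rfl
          · rw [if_neg, List.getD_eq_getElem?_getD,
              List.getElem?_set_ne (fun hh => hjm hh.symm),
              ← List.getD_eq_getElem?_getD]
            rintro ⟨hmem, sj', hsj', hint'⟩
            rcases List.mem_cons.mp hmem with rfl | hmt
            · exact hjm rfl
            · exact hm ⟨hmt, sj', hsj', hint'⟩
        · rw [if_neg hint, if_neg]
          rintro ⟨hmem, sj', hsj', hint'⟩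
          rcases List.mem_cons.mp hmem with rfl | hmt
          · rw [h] at hsj'; cases hsj'; exact hint hint'
          · exact hm ⟨hmt, sj', hsj', hint'⟩

theorem aInner_length (rl : List (Option (List String))) (si : List String) (c : Int)
    (js : List Nat) (labels : List Int) :
    (aInner rl si c labels js).length = labels.length := by
  induction js generalizing labels with
  | nil => rfl
  | cons j t ih =>
    unfold aInner
    simp only [List.foldl_cons]
    rw [show ∀ l, t.foldl _ l = aInner rl si c l t from fun l => rfl, ih]
    rcases rl.getD j none with _ | sj
    · rfl
    · dsimp only; split <;> simp

-- the per-suffix invariant carrying both machines to the same final labels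
theorem main_invariant (rl : List (Option (List String))) :
    ∀ (k i : Nat) (labelsA : List Int) (c : Int) (labelsB : List Int)
      (owner : PySem.Dict String Int),
      i + k = rl.length →
      labelsA.length = rl.length →
      labelsA.take i = labelsB →
      (∀ e, owner.getD e 0 < c) →
      1 ≤ c →
      (∀ j, i ≤ j → j < rl.length →
        labelsA.getD j 0 = match rl.getD j none with
          | none => 0
          | some sj => bBest owner sj) →
      ((List.range' i k).foldl (aStep rl) (labelsA, c)).1
        = ((rl.drop i).foldl bStep (labelsB, owner, c)).1 := by
  intro k
  induction k with
  | zero =>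
    intro i labelsA c labelsB owner hik hlen htake _ _ _
    have : i = rl.length := by omega
    subst this
    simp only [List.range'_zero, List.foldl_nil, List.drop_length, List.foldl_nil]
    rw [← htake, List.take_of_length_le (by omega)]
  | succ k ih =>
    intro i labelsA c labelsB owner hik hlen htake howner hc hsuffix
    have hi : i < rl.length := by omega
    have hdrop : rl.drop i = rl[i] :: rl.drop (i + 1) := List.drop_eq_getElem_cons hi
    have hgetD : rl.getD i none = rl[i] := by
      simp [List.getD_eq_getElem?_getD, List.getElem?_eq_getElem hi]
    have hrange : List.range' i (k + 1) = i :: List.range' (i + 1) k := by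
      simp [List.range'_succ]
    have hAi : labelsA.getD i 0 = (match rl.getD i none with
        | none => 0
        | some sj => bBest owner sj) := hsuffix i le_rfl hi
    have htake1 : ∀ v : Int, labelsA.getD i 0 = v → labelsA.take (i + 1) = labelsB ++ [v] := by
      intro v hv
      rw [List.take_add_one, htake, List.getElem?_eq_getElem (by omega : i < labelsA.length)]
      simp only [Option.toList_some]
      congr 1
      rw [← hv, List.getD_eq_getElem?_getD, List.getElem?_eq_getElem (by omega : i < labelsA.length)]
      rfl
    rw [hrange, hdrop, List.foldl_cons, List.foldl_cons]
    rcases hri : rl[i] with _ | si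
    · -- None at i
      have hstepA : aStep rl (labelsA, c) i = (labelsA, c) := by
        unfold aStep; rw [hgetD, hri]
      have hstepB : bStep (labelsB, owner, c) none = (labelsB ++ [0], owner, c) := rfl
      rw [hstepA, hstepB]
      apply ih (i + 1) labelsA c (labelsB ++ [0]) owner (by omega) hlen
      · apply htake1; rw [hAi, hgetD, hri]
      · exact howner
      · exact hc
      · intro j hj hjn; exact hsuffix j (by omega) hjn
    · by_cases hbz : bBest owner si ≠ 0
      · -- already labeled: A skips, B records best
        have hstepA : aStep rl (labelsA, c) i = (labelsA, c) := by
          unfold aStep; rw [hgetD, hri]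
          simp only []
          rw [if_pos]
          rw [hAi, hgetD, hri]; exact hbz
        have hstepB : bStep (labelsB, owner, c) (some si)
            = (labelsB ++ [bBest owner si], owner, c) := by
          unfold bStep
          simp only []
          rw [if_pos hbz]
        rw [hstepA, hstepB]
        apply ih (i + 1) labelsA c (labelsB ++ [bBest owner si]) owner (by omega) hlen
        · apply htake1; rw [hAi, hgetD, hri]
        · exact howner
        · exact hc
        · intro j hj hjn; exact hsuffix j (by omega) hjn
      · -- new leader i
        rw [ne_eq, not_not] at hbz
        set owner' := si.foldl (fun d e => d.insert e c) owner with howner'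
        set labels' := aInner rl si c (labelsA.set i c) (List.range' (i + 1) (rl.length - (i + 1)))
          with hlabels'
        have hstepA : aStep rl (labelsA, c) i = (labels', c + 1) := by
          unfold aStep; rw [hgetD, hri]
          simp only []
          rw [if_neg]
          rw [hAi, hgetD, hri]; simpa using hbz
        have hstepB : bStep (labelsB, owner, c) (some si) = (labelsB ++ [c], owner', c + 1) := by
          unfold bStep
          simp only []
          rw [if_neg (by simpa using hbz)]
        rw [hstepA, hstepB]
        have howner'getD : ∀ e, owner'.getD e 0 = if e ∈ si then c else owner.getD e 0 :=
          fun e => owner_insertAll_getD c si owner e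
        have hlen' : labels'.length = rl.length := by
          rw [hlabels', aInner_length]; simpa using hlen
        have hget' : ∀ m, m < rl.length → labels'.getD m 0
            = if (i + 1 ≤ m ∧ m < rl.length) ∧
                 ∃ sj, rl.getD m none = some sj ∧ pyIntersects si sj then c
              else (labelsA.set i c).getD m 0 := by
          intro m hmr
          have hmem : m ∈ List.range' (i + 1) (rl.length - (i + 1))
              ↔ (i + 1 ≤ m ∧ m < rl.length) := by
            rw [List.mem_range'_1]; omega
          rw [hlabels', aInner_getD _ _ _ _ _ _ (by rw [List.length_set]; omega)]
          simp only [hmem]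
        apply ih (i + 1) labels' (c + 1) (labelsB ++ [c]) owner' (by omega) hlen'
        · -- prefix
          have : labels'.take (i + 1) = labelsA.take i ++ [c] := by
            apply List.ext_getElem
            · simp only [List.length_take, List.length_append, List.length_take,
                List.length_singleton]
              omega
            · intro m hm1 hm2
              have hmle : m < i + 1 := by
                simp only [List.length_take] at hm1; omega
              have hmr : m < rl.length := by omega
              rw [List.getElem_take]
              have hgd : labels'[m] = labels'.getD m 0 := by
                rw [List.getD_eq_getElem?_getD, List.getElem?_eq_getElem (by omega)]; rfl
              rw [hgd, hget' m (by omega)]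
              rw [if_neg (by rintro ⟨⟨h1, _⟩, _⟩; omega)]
              by_cases hmi : m = i
              · subst hmi
                rw [List.getD_eq_getElem?_getD, List.getElem?_set_self (by omega)]
                simp only [Option.getD_some]
                rw [List.getElem_append_right (by simp only [List.length_take]; omega)]
                simp [List.length_take, min_eq_left (by omega : m ≤ labelsA.length)]
              · have hmlt : m < i := by omega
                rw [List.getD_eq_getElem?_getD, List.getElem?_set_ne (by omega),
                  List.getElem?_eq_getElem (by omega : m < labelsA.length)]
                simp only [Option.getD_some]
                rw [List.getElem_append_left (by simp [List.length_take]; omega)]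
                simp [List.getElem_take]
          rw [this, htake]
        · intro e; rw [howner'getD]; split
          · omega
          · have := howner e; omega
        · omega
        · -- suffix at i+1 against owner'
          intro j hj hjn
          rw [hget' j hjn]
          rcases hrj : rl.getD j none with _ | sj
          · rw [if_neg (by rintro ⟨_, sj, hsj, _⟩; cases hsj)]
            rw [List.getD_eq_getElem?_getD, List.getElem?_set_ne (by omega),
              ← List.getD_eq_getElem?_getD]
            have := hsuffix j (by omega) hjn
            rw [hrj] at this; exact this
          · by_cases hint : pyIntersects si sj
            · rw [if_pos ⟨⟨hj, hjn⟩, sj, rfl, hint⟩]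
              -- bBest owner' sj = c
              obtain ⟨x, hxsi, hxsj⟩ : ∃ x ∈ si, x ∈ sj := by
                rcases List.any_eq_true.mp hint with ⟨x, hx1, hx2⟩
                exact ⟨x, hx1, by simpa using hx2⟩
              have hle : bBest owner' sj ≤ c := by
                apply bBest_le _ _ _ (by omega)
                intro e _
                rw [howner'getD]; split
                · exact le_rfl
                · have := howner e; omega
              have hge : c ≤ bBest owner' sj := by
                have := mem_le_bAux owner' sj 0 x hxsj
                rw [howner'getD x, if_pos hxsi] at this
                exact this
              dsimp only
              omega
            · rw [if_neg (by rintro ⟨_, sj', hsj', hint'⟩; cases hsj'; exact hint hint')]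
              rw [List.getD_eq_getElem?_getD, List.getElem?_set_ne (by omega),
                ← List.getD_eq_getElem?_getD]
              have hold := hsuffix j (by omega) hjn
              rw [hrj] at hold
              rw [hold]
              apply bBest_congr
              intro e hesj
              rw [howner'getD, if_neg]
              intro hesi
              exact hint (List.any_eq_true.mpr ⟨e, hesi, by simpa using hesj⟩)

-- ===== VERDICT (by name: the statement is the Claim_ definition above) =====
theorem assign_labels_based_on_repos_spec : Claim_equal_assign_labels_based_on_repos := by
  intro rl _
  unfold Spec_assign_labels_based_on_repos assign_labels_based_on_repos
    assign_labels_based_on_repos_alt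
  rw [List.range_eq_range']
  rw [main_invariant rl rl.length 0 (List.replicate rl.length 0) 1 [] PySem.Dict.empty
    (by omega) (by simp) (by simp) (by intro e; simp [PySem.Dict.getD_empty]) le_rfl ?_]
  · simp
  · intro j _ hj
    rcases h : rl.getD j none with _ | sj
    · simp [List.getD_eq_getElem?_getD, List.getElem?_replicate_of_lt hj]
    · simp [List.getD_eq_getElem?_getD, List.getElem?_replicate_of_lt hj, bBest_empty]
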